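-- pv_equiv track=rewrite | github.com/flypigzju/TileLevel | pattern_analyzer.py | build_occupancy
-- ===== SOURCE A (Python) =====
-- from typing import Dict, List, Tuple
--
-- Point = Tuple[int, int]
--
-- def compress_axes(points: List[Point]):
--     xs = sorted(set(p[0] for p in points))
--     ys = sorted(set(p[1] for p in points))
--     x_to_i = {x: i for i, x in enumerate(xs)}
--     y_to_j = {y: j for j, y in enumerate(ys)}
--     return xs, ys, x_to_i, y_to_j
--
-- def build_occupancy(points: List[Point]):
--     """
--     Occupancy on compressed grid:
--       occ[j][i] = True if point exists at that (x_i, y_j)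
--     """
--     xs, ys, x_to_i, y_to_j = compress_axes(points)
--     w = len(xs)
--     h = len(ys)
--     occ = [[False] * w for _ in range(h)]
--     for x, y in points:
--         occ[y_to_j[y]][x_to_i[x]] = True
--     return occ, xs, ys
-- ===== SOURCE B (Python) =====
-- def build_occupancy(points):
--     """
--     Occupancy on compressed grid:
--       occ[j][i] = True if point exists at that (x_i, y_j)
--     """
--     point_set = set(points)
--     xs = sorted({p[0] for p in points})
--     ys = sorted({p[1] for p in points})
--     occ = [[(x, y) in point_set for x in xs] for y in ys]
--     return occ, xs, ys
-- ===== Notes on version B (the rewrite author's own statement) =====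
-- stated objective: idiomatic
-- what changed: Cell-centric construction: instead of initializing an all-False grid and marking each point via the x->i / y->j index dicts, B builds a point set once and constructs every row by a double comprehension testing (x, y) membership for each compressed cell; the index dicts and the mutation loop disappear.
import Mathlib
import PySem

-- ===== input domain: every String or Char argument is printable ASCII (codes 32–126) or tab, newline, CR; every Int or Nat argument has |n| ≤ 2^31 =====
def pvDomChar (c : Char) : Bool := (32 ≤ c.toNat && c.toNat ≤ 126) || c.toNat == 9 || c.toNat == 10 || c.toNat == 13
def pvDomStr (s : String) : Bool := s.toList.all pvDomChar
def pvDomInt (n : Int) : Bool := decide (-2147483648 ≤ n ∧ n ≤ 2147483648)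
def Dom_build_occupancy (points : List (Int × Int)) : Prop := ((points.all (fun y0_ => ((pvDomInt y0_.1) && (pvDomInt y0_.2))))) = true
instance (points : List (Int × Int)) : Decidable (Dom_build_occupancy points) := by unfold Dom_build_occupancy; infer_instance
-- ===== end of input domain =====

-- B builds the grid cell-centrically (membership of each compressed cell in a point set)
-- instead of A's initialize-then-mark loop through index dicts; same cost, more idiomatic.


-- ===== PORT A =====
-- sorted(set(...)) : PySem.List.sorted of PySem.Set.ofList; dict comprehensions over enumerate
def compress_axes (points : List (Int × Int)) :
    List Int × List Int × PySem.Dict Int Int × PySem.Dict Int Int :=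
  let xs := PySem.List.sorted (PySem.Set.ofList (points.map (fun p => p.1))) (fun x => x) false
  let ys := PySem.List.sorted (PySem.Set.ofList (points.map (fun p => p.2))) (fun x => x) false
  let x_to_i := (PySem.List.enumerate xs 0).foldl (fun (d : PySem.Dict Int Int) (p : Int × Int) => d.insert p.2 p.1) PySem.Dict.empty
  let y_to_j := (PySem.List.enumerate ys 0).foldl (fun (d : PySem.Dict Int Int) (p : Int × Int) => d.insert p.2 p.1) PySem.Dict.empty
  (xs, ys, x_to_i, y_to_j)

-- occ[y_to_j[y]][x_to_i[x]] = True: the dict keys are always present (x, y come from points)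
-- and the looked-up indices are enumerate values, hence nonnegative and in range, so
-- getD/toNat/List.set is exact here (no KeyError/IndexError is reachable).
def build_occupancy (points : List (Int × Int)) : List (List Bool) × List Int × List Int :=
  let axes := compress_axes points
  let xs := axes.1
  let ys := axes.2.1
  let x_to_i := axes.2.2.1
  let y_to_j := axes.2.2.2
  let w := xs.length
  let h := ys.length
  let occ0 := (List.range h).map (fun _ => List.replicate w false)
  let occ := points.foldl (fun occ p =>
    let j := (y_to_j.getD p.2 0).toNat
    let i := (x_to_i.getD p.1 0).toNat
    occ.set j ((occ.getD j []).set i true)) occ0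
  (occ, xs, ys)

-- ===== PORT B =====
def build_occupancy_alt (points : List (Int × Int)) : List (List Bool) × List Int × List Int :=
  let point_set := PySem.Set.ofList points
  let xs := PySem.List.sorted (PySem.Set.ofList (points.map (fun p => p.1))) (fun x => x) false
  let ys := PySem.List.sorted (PySem.Set.ofList (points.map (fun p => p.2))) (fun x => x) false
  let occ := ys.map (fun y => xs.map (fun x => PySem.Set.contains point_set (x, y)))
  (occ, xs, ys)

-- ===== PRECONDITION & SPEC =====
def Spec_build_occupancy (points : List (Int × Int)) (out : List (List Bool) × List Int × List Int) : Prop := out = build_occupancy_alt points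
instance (points : List (Int × Int)) (out : List (List Bool) × List Int × List Int) : Decidable (Spec_build_occupancy points out) := by unfold Spec_build_occupancy; infer_instance

-- ===== CLAIM (what is proved, stated in full; the proofs are below) =====
def Claim_equal_build_occupancy : Prop := ∀ (points : List (Int × Int)), Dom_build_occupancy points → Spec_build_occupancy points (build_occupancy points)

-- ===== LEMMAS AND PROOFS =====

-- the enumerate-dict: keys not in the list are untouched
theorem getD_foldl_enum_not_mem (l : List Int) (s : Int) (d : PySem.Dict Int Int)
    (y : Int) (hy : y ∉ l) :
    ((PySem.List.enumerate l s).foldl (fun (d : PySem.Dict Int Int) (p : Int × Int) => d.insert p.2 p.1) d).get? y = d.get? y := by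
  induction l generalizing s d with
  | nil => simp [PySem.List.enumerate_nil]
  | cons x t ih =>
    simp only [PySem.List.enumerate_cons, List.foldl_cons]
    rw [ih _ _ (fun h => hy (List.mem_cons_of_mem _ h))]
    rw [PySem.Dict.get?_insert_of_ne]
    exact fun h => hy (h ▸ List.mem_cons_self)

-- the enumerate-dict maps each element of a nodup list to (start + its index)
theorem get?_foldl_enum (l : List Int) (s : Int) (d : PySem.Dict Int Int)
    (hl : l.Nodup) (y : Int) (hy : y ∈ l) :
    ((PySem.List.enumerate l s).foldl (fun (d : PySem.Dict Int Int) (p : Int × Int) => d.insert p.2 p.1) d).get? y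
      = some (s + (l.idxOf y : Int)) := by
  induction l generalizing s d with
  | nil => simp at hy
  | cons x t ih =>
    simp only [PySem.List.enumerate_cons, List.foldl_cons]
    rcases List.mem_cons.mp hy with rfl | hyt
    · rw [getD_foldl_enum_not_mem _ _ _ _ ((List.nodup_cons.mp hl).1)]
      simp [PySem.Dict.get?_insert_self]
    · have hne : y ≠ x := fun h => (List.nodup_cons.mp hl).1 (h ▸ hyt)
      rw [ih _ _ (List.nodup_cons.mp hl).2 hyt, List.idxOf_cons_ne _ (Ne.symm hne)]
      congr 1
      push_cast
      ring

theorem getD_enum_dict (l : List Int) (hl : l.Nodup) (y : Int) (hy : y ∈ l) :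
    (((PySem.List.enumerate l 0).foldl (fun (d : PySem.Dict Int Int) (p : Int × Int) => d.insert p.2 p.1) PySem.Dict.empty).getD y 0).toNat
      = l.idxOf y := by
  have h := get?_foldl_enum l 0 PySem.Dict.empty hl y hy
  have : ((PySem.List.enumerate l 0).foldl (fun (d : PySem.Dict Int Int) (p : Int × Int) => d.insert p.2 p.1) PySem.Dict.empty).getD y 0
      = 0 + (l.idxOf y : Int) := by
    rw [PySem.Dict.getD_eq_get?_getD, h]
    rfl
  simp [this]

-- the abstract marking step, with exact indices
def markStep (xs ys : List Int) (occ : List (List Bool)) (p : Int × Int) : List (List Bool) :=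
  occ.set (ys.idxOf p.2) ((occ.getD (ys.idxOf p.2) []).set (xs.idxOf p.1) true)

-- the closed form of the whole marking fold
def markAll (xs ys : List Int) (pts : List (Int × Int)) (g : List (List Bool)) : List (List Bool) :=
  g.mapIdx (fun j row => row.mapIdx (fun i b => b || decide ((xs.getD i 0, ys.getD j 0) ∈ pts)))

theorem mapIdx_const_fn (l : List Bool) : l.mapIdx (fun _ b => b) = l := by
  induction l with
  | nil => rfl
  | cons x t ih => rw [List.mapIdx_cons]; exact congrArg _ ih

theorem markAll_nil (xs ys : List Int) (g : List (List Bool)) : markAll xs ys [] g = g := by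
  unfold markAll
  apply List.ext_getElem?
  intro j
  simp [mapIdx_const_fn]

theorem length_markStep (xs ys : List Int) (occ : List (List Bool)) (p : Int × Int) :
    (markStep xs ys occ p).length = occ.length := by
  simp [markStep]

theorem rows_markStep (xs ys : List Int) (occ : List (List Bool)) (p : Int × Int)
    (hjp : ys.idxOf p.2 < occ.length)
    (hrow : ∀ r ∈ occ, r.length = xs.length) :
    ∀ r ∈ markStep xs ys occ p, r.length = xs.length := by
  intro r hr
  rcases List.mem_or_eq_of_mem_set hr with h | rfl
  · exact hrow r h
  · simp [List.getD, List.getElem?_eq_getElem hjp, hrow _ (List.getElem_mem hjp)]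

-- one marking step, pointwise
theorem markStep_entry (xs ys : List Int) (hx : xs.Nodup) (hy : ys.Nodup)
    (occ : List (List Bool)) (hg : occ.length = ys.length)
    (hrow : ∀ r ∈ occ, r.length = xs.length)
    (p : Int × Int) (hp1 : p.1 ∈ xs) (hp2 : p.2 ∈ ys)
    (j : Nat) (hj : j < occ.length) (i : Nat) (hi : i < xs.length) :
    (markStep xs ys occ p)[j]?.bind (fun row => row[i]?)
      = some ((occ[j]'hj)[i]'(by rw [hrow _ (List.getElem_mem hj)]; exact hi)
          || decide (p = (xs.getD i 0, ys.getD j 0))) := by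
  have hjp : ys.idxOf p.2 < ys.length := List.idxOf_lt_length_of_mem hp2
  have hip : xs.idxOf p.1 < xs.length := List.idxOf_lt_length_of_mem hp1
  have hjp' : ys.idxOf p.2 < occ.length := hg ▸ hjp
  have hyget : ys[ys.idxOf p.2]'hjp = p.2 := List.getElem_idxOf _
  have hxget : xs[xs.idxOf p.1]'hip = p.1 := List.getElem_idxOf _
  have hrowlen : (occ[j]'hj).length = xs.length := hrow _ (List.getElem_mem hj)
  have hygetD : ys.getD j 0 = ys[j]'(hg ▸ hj) := by
    simp [List.getD, List.getElem?_eq_getElem (hg ▸ hj)]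
  have hxgetD : xs.getD i 0 = xs[i]'hi := by
    simp [List.getD, List.getElem?_eq_getElem hi]
  have hoccD : occ.getD (ys.idxOf p.2) [] = occ[ys.idxOf p.2]'hjp' := by
    simp [List.getD, List.getElem?_eq_getElem hjp']
  rw [markStep, hoccD]
  by_cases hje : j = ys.idxOf p.2
  · subst hje
    rw [List.getElem?_set_self hjp']
    simp only [Option.bind_some]
    have hiplen : xs.idxOf p.1 < (occ[ys.idxOf p.2]'hjp').length := by
      rw [hrow _ (List.getElem_mem hjp')]; exact hip
    by_cases hie : i = xs.idxOf p.1
    · subst hie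
      rw [List.getElem?_set_self hiplen]
      have hq : p = (xs.getD (xs.idxOf p.1) 0, ys.getD (ys.idxOf p.2) 0) := by
        rw [hxgetD, hygetD]
        exact Prod.ext hxget.symm hyget.symm
      rw [decide_eq_true hq, Bool.or_true]
    · rw [List.getElem?_set_ne (fun h => hie h.symm),
          List.getElem?_eq_getElem (show i < (occ[ys.idxOf p.2]'hjp').length by
            rw [hrow _ (List.getElem_mem hjp')]; exact hi)]
      have hne : ¬ p = (xs.getD i 0, ys.getD (ys.idxOf p.2) 0) := by
        intro h
        apply hie
        have h1 : p.1 = xs[i]'hi := by rw [h, hxgetD]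
        have h2 : xs.idxOf p.1 = i := by rw [h1]; exact hx.idxOf_getElem i hi
        exact h2.symm
      rw [decide_eq_false hne, Bool.or_false]
  · rw [List.getElem?_set_ne (fun h => hje h.symm), List.getElem?_eq_getElem hj]
    simp only [Option.bind_some]
    rw [List.getElem?_eq_getElem (show i < (occ[j]'hj).length by rw [hrowlen]; exact hi)]
    have hne : ¬ p = (xs.getD i 0, ys.getD j 0) := by
      intro h
      apply hje
      have h1 : p.2 = ys[j]'(hg ▸ hj) := by rw [h, hygetD]
      have h2 : ys.idxOf p.2 = j := by rw [h1]; exact hy.idxOf_getElem j (hg ▸ hj)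
      exact h2.symm
    rw [decide_eq_false hne, Bool.or_false]

-- the fold computes markAll
theorem fold_markStep (xs ys : List Int) (hx : xs.Nodup) (hy : ys.Nodup)
    (pts : List (Int × Int)) (hmem : ∀ p ∈ pts, p.1 ∈ xs ∧ p.2 ∈ ys)
    (g : List (List Bool)) (hg : g.length = ys.length)
    (hrow : ∀ r ∈ g, r.length = xs.length) :
    pts.foldl (markStep xs ys) g = markAll xs ys pts g := by
  induction pts generalizing g with
  | nil => rw [List.foldl_nil, markAll_nil]
  | cons p pts ih =>
    have hp := hmem p List.mem_cons_self
    have hjp : ys.idxOf p.2 < g.length := hg ▸ List.idxOf_lt_length_of_mem hp.2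
    rw [List.foldl_cons,
        ih (fun q hq => hmem q (List.mem_cons_of_mem _ hq)) _
          (by rw [length_markStep, hg]) (rows_markStep _ _ _ _ hjp hrow)]
    apply List.ext_getElem?
    intro j
    unfold markAll
    by_cases hj : j < g.length
    · have hj' : j < (markStep xs ys g p).length := by rw [length_markStep]; exact hj
      rw [List.getElem?_mapIdx, List.getElem?_mapIdx,
          List.getElem?_eq_getElem hj, List.getElem?_eq_getElem hj']
      simp only [Option.map_some]
      congr 1
      apply List.ext_getElem?
      intro i
      rw [List.getElem?_mapIdx, List.getElem?_mapIdx]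
      by_cases hi : i < xs.length
      · have he := markStep_entry xs ys hx hy g hg hrow p hp.1 hp.2 j hj i hi
        rw [List.getElem?_eq_getElem hj'] at he
        simp only [Option.bind_some] at he
        rw [he, List.getElem?_eq_getElem
            (by rw [hrow _ (List.getElem_mem hj)]; exact hi)]
        simp only [Option.map_some, Option.some.injEq, List.mem_cons]
        by_cases hc : (xs.getD i 0, ys.getD j 0) = p
        · rw [decide_eq_true hc.symm, decide_eq_true (Or.inl hc)]
          simp
        · have hc' : ¬ p = (xs.getD i 0, ys.getD j 0) := fun h => hc h.symm
          rw [decide_eq_false hc']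
          simp only [Bool.or_false, hc, false_or]
      · have h1 : ((markStep xs ys g p)[j]'hj').length = xs.length :=
          rows_markStep _ _ _ _ hjp hrow _ (List.getElem_mem hj')
        have h2 : (g[j]'hj).length = xs.length := hrow _ (List.getElem_mem hj)
        have hiA : ((markStep xs ys g p)[j]'hj').length ≤ i := by omega
        have hiB : (g[j]'hj).length ≤ i := by omega
        rw [List.getElem?_eq_none hiA, List.getElem?_eq_none hiB]
        simp
    · have hA : g.length ≤ j := le_of_not_gt hj
      have hB : (markStep xs ys g p).length ≤ j := by rw [length_markStep]; exact hA
      rw [List.getElem?_mapIdx, List.getElem?_mapIdx,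
          List.getElem?_eq_none hB, List.getElem?_eq_none hA]
      simp

theorem markAll_replicate (xs ys : List Int) (pts : List (Int × Int)) :
    markAll xs ys pts ((List.range ys.length).map (fun _ => List.replicate xs.length false))
      = ys.map (fun y => xs.map (fun x => PySem.Set.contains (PySem.Set.ofList pts) (x, y))) := by
  apply List.ext_getElem?
  intro j
  unfold markAll
  rw [List.getElem?_mapIdx, List.getElem?_map, List.getElem?_map]
  by_cases hj : j < ys.length
  · rw [List.getElem?_range hj, List.getElem?_eq_getElem hj]
    simp only [Option.map_some, Option.some.injEq]
    apply List.ext_getElem?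
    intro i
    rw [List.getElem?_mapIdx, List.getElem?_map]
    by_cases hi : i < xs.length
    · rw [List.getElem?_replicate_of_lt hi, List.getElem?_eq_getElem hi]
      simp only [Option.map_some, Option.some.injEq, Bool.false_or]
      have hx : xs.getD i 0 = xs[i]'hi := by
        simp [List.getD, List.getElem?_eq_getElem hi]
      have hy : ys.getD j 0 = ys[j]'hj := by
        simp [List.getD, List.getElem?_eq_getElem hj]
      rw [hx, hy]
      simp [PySem.Set.contains, PySem.Set.mem_ofList]
    · rw [List.getElem?_eq_none (by simpa using le_of_not_gt hi),
          List.getElem?_eq_none (by simpa [List.length_replicate] using le_of_not_gt hi)]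
      simp
  · rw [List.getElem?_eq_none (by simpa [List.length_range] using le_of_not_gt hj),
        List.getElem?_eq_none (le_of_not_gt hj)]
    simp

theorem build_occupancy_eq_alt (points : List (Int × Int)) :
    build_occupancy points = build_occupancy_alt points := by
  unfold build_occupancy build_occupancy_alt compress_axes
  dsimp only
  have hxnd : (PySem.List.sorted (PySem.Set.ofList (points.map (fun p => p.1))) (fun x => x) false).Nodup :=
    (PySem.List.sorted_ofList_pairwise_lt _).nodup
  have hynd : (PySem.List.sorted (PySem.Set.ofList (points.map (fun p => p.2))) (fun x => x) false).Nodup :=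
    (PySem.List.sorted_ofList_pairwise_lt _).nodup
  have hmem : ∀ p ∈ points,
      p.1 ∈ PySem.List.sorted (PySem.Set.ofList (points.map (fun p => p.1))) (fun x => x) false ∧
      p.2 ∈ PySem.List.sorted (PySem.Set.ofList (points.map (fun p => p.2))) (fun x => x) false := by
    intro p hp
    constructor <;>
      simp only [PySem.List.mem_sorted, PySem.Set.mem_ofList, List.mem_map] <;>
      exact ⟨p, hp, rfl⟩
  congr 1
  rw [PySem.List.foldl_congr_mem _ _
      (markStep (PySem.List.sorted (PySem.Set.ofList (points.map (fun p => p.1))) (fun x => x) false)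
        (PySem.List.sorted (PySem.Set.ofList (points.map (fun p => p.2))) (fun x => x) false)) _
      (by
        intro occ p hp
        rw [markStep, getD_enum_dict _ hynd p.2 (hmem p hp).2,
            getD_enum_dict _ hxnd p.1 (hmem p hp).1])]
  rw [fold_markStep _ _ hxnd hynd points hmem _ (by simp) (by
      intro r hr
      rcases List.mem_map.mp hr with ⟨_, _, rfl⟩
      simp)]
  exact markAll_replicate _ _ _

-- ===== VERDICT (by name: the statement is the Claim_ definition above) =====
theorem build_occupancy_spec : Claim_equal_build_occupancy := by
  intro points _
  exact build_occupancy_eq_alt points
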